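-- pv_equiv track=rewrite | github.com/Likhi/kata | python/Decode the Morse code advanced/morse code.py | xmt_freq
-- ===== SOURCE A (Python) =====
-- def xmt_freq(bits):
--     run = 999999 # initial guess; impractically long so that any real frequency will be less
--     current_run = 0
--     if '0' not in bits:
--         return bits.count('1')
--     else:
--         for b in bits:
--             if b == '1':
--                 current_run +=1
--             else:
--                 if current_run > 0 and current_run <= run:
--                     run = current_run
--                 current_run = 0
--
--     # sometimes there's actually middle 0s and their runs are very short. this means the time base is from 0
--     if run > bits.count('0'):
--         run = bits.count('0')
--
--     return run
-- ===== SOURCE B (Python) =====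
-- def xmt_freq(bits):
--     # chunk-at-a-time: measure each maximal run of 1s and skip past its terminator,
--     # instead of a per-character state machine
--     if '0' not in bits:
--         return bits.count('1')
--     run = 999999
--     rest = bits
--     while rest:
--         k = 0
--         while k < len(rest) and rest[k] == '1':
--             k += 1
--         if k < len(rest) and k > 0:
--             run = min(run, k)
--         rest = rest[k+1:]
--     return min(run, bits.count('0'))
-- ===== Notes on version B (the rewrite author's own statement) =====
-- stated objective: alternative
-- what changed: B replaces A's per-character state machine (a running current_run counter with conditional min update and a post-hoc cap branch) by a chunk-at-a-time loop that measures each maximal run of ones, skips past its terminator, and reduces with min(), then caps with the zero count.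
import Mathlib
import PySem

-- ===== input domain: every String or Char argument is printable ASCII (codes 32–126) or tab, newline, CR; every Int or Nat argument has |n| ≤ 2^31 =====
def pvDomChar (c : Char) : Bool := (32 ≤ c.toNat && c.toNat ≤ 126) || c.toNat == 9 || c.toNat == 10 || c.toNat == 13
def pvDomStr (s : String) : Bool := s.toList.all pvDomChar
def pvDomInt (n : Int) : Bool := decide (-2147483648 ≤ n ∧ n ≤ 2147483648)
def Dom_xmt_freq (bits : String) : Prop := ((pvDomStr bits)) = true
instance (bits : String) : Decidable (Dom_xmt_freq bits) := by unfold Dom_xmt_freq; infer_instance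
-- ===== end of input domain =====

-- B replaces A's per-character state machine by a chunk-at-a-time loop over maximal runs of 1s
-- (objective: alternative decomposition, same asymptotic cost). Return-value equivalence; neither mutates anything.

-- ===== PORT A =====
def xmt_freq (bits : String) : Int :=
  -- run = 999999; current_run = 0; the for-loop is a foldl over the state pair (run, current_run)
  if ¬ PySem.Str.isIn "0" bits then (PySem.Str.count bits "1" : Int)
  else
    -- if run > bits.count('0'): run = bits.count('0')
    if (bits.toList.foldl
          (fun (p : Int × Int) b =>
            if b = '1' then (p.1, p.2 + 1)
            else (if 0 < p.2 ∧ p.2 ≤ p.1 then p.2 else p.1, 0))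
          (999999, 0)).1 > (PySem.Str.count bits "0" : Int) then (PySem.Str.count bits "0" : Int)
    else
      (bits.toList.foldl
          (fun (p : Int × Int) b =>
            if b = '1' then (p.1, p.2 + 1)
            else (if 0 < p.2 ∧ p.2 ≤ p.1 then p.2 else p.1, 0))
          (999999, 0)).1

-- ===== PORT B =====
-- inner while: k = number of leading '1' characters of rest
def pvCountLead : List Char → Nat
  | [] => 0
  | c :: cs => if c = '1' then pvCountLead cs + 1 else 0

-- outer while: consume one maximal run of 1s plus its terminator per iteration
def pvLoop (run : Int) (rest : List Char) : Int :=
  if h : rest = [] then run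
  else
    pvLoop
      (if pvCountLead rest < rest.length ∧ 0 < pvCountLead rest
       then min run (pvCountLead rest : Int) else run)
      (rest.drop (pvCountLead rest + 1))
termination_by rest.length
decreasing_by
  have hne : rest.length ≠ 0 := fun h0 => h (List.length_eq_zero_iff.mp h0)
  simp only [List.length_drop]
  omega

def xmt_freq_alt (bits : String) : Int :=
  if ¬ PySem.Str.isIn "0" bits then (PySem.Str.count bits "1" : Int)
  else min (pvLoop 999999 bits.toList) (PySem.Str.count bits "0" : Int)

-- ===== PRECONDITION & SPEC =====
def Spec_xmt_freq (bits : String) (out : Int) : Prop := out = xmt_freq_alt bits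
instance (bits : String) (out : Int) : Decidable (Spec_xmt_freq bits out) := by unfold Spec_xmt_freq; infer_instance

-- ===== CLAIM (what is proved, stated in full; the proofs are below) =====
def Claim_equal_xmt_freq : Prop := ∀ (bits : String), Dom_xmt_freq bits → Spec_xmt_freq bits (xmt_freq bits)

-- ===== LEMMAS AND PROOFS =====

theorem pvCountLead_le (cs : List Char) : pvCountLead cs ≤ cs.length := by
  induction cs with
  | nil => simp [pvCountLead]
  | cons c cs ih =>
    by_cases h : c = '1'
    · simp only [pvCountLead, h, if_pos, List.length_cons]; omega
    · simp [pvCountLead, h]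

-- common spec: T cur cs = shortest terminated run of 1s, where cur 1s are already pending; 999999 if none
def pvT (cur : Int) : List Char → Int
  | [] => 999999
  | c :: cs => if c = '1' then pvT (cur + 1) cs else (if 0 < cur then min cur (pvT 0 cs) else pvT 0 cs)

-- A's fold equals min run (pvT cur cs)  (for run ≤ 999999)
theorem pvFoldA_eq (cs : List Char) : ∀ (run cur : Int), run ≤ 999999 →
    (cs.foldl (fun (p : Int × Int) b =>
        if b = '1' then (p.1, p.2 + 1)
        else (if 0 < p.2 ∧ p.2 ≤ p.1 then p.2 else p.1, 0)) (run, cur)).1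
      = min run (pvT cur cs) := by
  induction cs with
  | nil => intro run cur h; simp [pvT]; omega
  | cons c cs ih =>
    intro run cur h
    by_cases hc : c = '1'
    · simp [List.foldl_cons, hc, pvT, ih run (cur + 1) h]
    · simp only [List.foldl_cons, hc, pvT, if_false]
      by_cases hcur : 0 < cur ∧ cur ≤ run
      · rw [if_pos hcur, ih cur 0 (by omega), if_pos hcur.1]
        omega
      · rw [if_neg hcur, ih run 0 h]
        by_cases h1 : 0 < cur
        · rw [if_pos h1]; omega
        · rw [if_neg h1]

theorem pvT_lead (cs : List Char) : ∀ (cur : Int),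
    pvT cur cs = pvT (cur + (pvCountLead cs : Int)) (cs.drop (pvCountLead cs)) := by
  induction cs with
  | nil => intro cur; simp [pvCountLead]
  | cons c cs ih =>
    intro cur
    by_cases hc : c = '1'
    · simp only [pvCountLead, pvT, hc, if_pos]
      rw [ih (cur + 1)]
      have : cur + 1 + (pvCountLead cs : Int) = cur + ((pvCountLead cs + 1 : Nat) : Int) := by
        push_cast; ring
      rw [this]
      rfl
    · simp [pvCountLead, hc, pvT]

theorem pvDrop_head_ne (cs : List Char) (h : pvCountLead cs < cs.length) :
    ∃ c rest, cs.drop (pvCountLead cs) = c :: rest ∧ c ≠ '1' := by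
  induction cs with
  | nil => simp at h
  | cons c cs ih =>
    by_cases hc : c = '1'
    · simp only [pvCountLead, if_pos hc, List.drop_succ_cons]
      exact ih (by simp only [pvCountLead, if_pos hc, List.length_cons] at h; omega)
    · exact ⟨c, cs, by simp [pvCountLead, hc], hc⟩

-- B's loop equals min run (pvT 0 cs)  (for run ≤ 999999)
theorem pvLoop_eq_aux (n : Nat) : ∀ (cs : List Char), cs.length ≤ n → ∀ (run : Int), run ≤ 999999 →
    pvLoop run cs = min run (pvT 0 cs) := by
  induction n with
  | zero =>
    intro cs hlen run h
    have : cs = [] := List.length_eq_zero_iff.mp (by omega)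
    subst this; rw [pvLoop]; simp [pvT]; omega
  | succ n ih =>
    intro cs hlen run h
    by_cases hnil : cs = []
    · subst hnil; rw [pvLoop]; simp [pvT]; omega
    · rw [pvLoop, dif_neg hnil]
      have hkle : pvCountLead cs ≤ cs.length := pvCountLead_le cs
      have hT := pvT_lead cs 0
      have hlen1 : cs.length ≠ 0 := fun h0 => hnil (List.length_eq_zero_iff.mp h0)
      have hrec : (cs.drop (pvCountLead cs + 1)).length ≤ n := by
        simp only [List.length_drop]; omega
      by_cases hlt : pvCountLead cs < cs.length
      · obtain ⟨c, rest, hdrop, hc1⟩ := pvDrop_head_ne cs hlt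
        have hsub : cs.drop (pvCountLead cs + 1) = rest := by
          have h1 : cs.drop (pvCountLead cs + 1) = List.drop 1 (cs.drop (pvCountLead cs)) := by
            rw [List.drop_drop]
          rw [h1, hdrop]; rfl
        have hTcs : pvT 0 cs = if 0 < ((pvCountLead cs : Nat) : Int)
            then min ((pvCountLead cs : Nat) : Int) (pvT 0 rest) else pvT 0 rest := by
          rw [hT, hdrop]; simp [pvT, hc1]
        by_cases hk0 : 0 < pvCountLead cs
        · rw [if_pos ⟨hlt, hk0⟩, hsub, ih rest (hsub ▸ hrec) (min run (pvCountLead cs : Int)) (by omega)]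
          rw [hTcs, if_pos (by exact_mod_cast hk0)]
          omega
        · rw [if_neg (by omega), hsub, ih rest (hsub ▸ hrec) run h, hTcs, if_neg (by omega)]
      · have hnilrest : cs.drop (pvCountLead cs + 1) = [] := by
          rw [List.drop_eq_nil_iff]; omega
        rw [if_neg (by omega), hnilrest, pvLoop]
        rw [hT, show pvCountLead cs = cs.length by omega, List.drop_length]
        simp [pvT]; omega

-- ===== VERDICT (by name: the statement is the Claim_ definition above) =====
theorem xmt_freq_spec : Claim_equal_xmt_freq := by
  intro bits _
  unfold Spec_xmt_freq xmt_freq xmt_freq_alt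
  by_cases h : ¬ PySem.Str.isIn "0" bits
  · rw [if_pos h, if_pos h]
  · rw [if_neg h, if_neg h,
      pvFoldA_eq bits.toList 999999 0 (by omega),
      pvLoop_eq_aux bits.toList.length bits.toList (le_refl _) 999999 (by omega)]
    omega
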